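-- pv_equiv track=rewrite | github.com/jojonicho/algorithms | rokedamu/b3.py | solve
-- ===== SOURCE A (Python) =====
-- def solve(X, H):
--     n = len(X)
--     st, ans = [], [0] * n
--     for i in range(n - 1, -1, -1):
--         dist = X[i] + H[i]
--         while st and st[-1][0] <= dist:
--             cur = st.pop()
--             dist = max(dist, cur[1])
--         st.append((X[i], dist))
--         ans[i] = dist
--     return ans
-- ===== SOURCE B (Python) =====
-- def solve(X, H):
--     n = len(X)
--     ans = [0] * n
--     for i in range(n - 1, -1, -1):
--         dist = X[i] + H[i]
--         for j in range(i + 1, n):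
--             if X[j] <= dist:
--                 dist = max(dist, ans[j])
--             else:
--                 break
--         ans[i] = dist
--     return ans
-- ===== Notes on version B (the rewrite author's own statement) =====
-- stated objective: simpler
-- what changed: Replaced the monotonic stack (pop-while with stored reaches) by a stack-free right-to-left loop whose inner forward scan over already-computed ans[j] absorbs reaches until the first X[j] > dist.
import Mathlib
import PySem

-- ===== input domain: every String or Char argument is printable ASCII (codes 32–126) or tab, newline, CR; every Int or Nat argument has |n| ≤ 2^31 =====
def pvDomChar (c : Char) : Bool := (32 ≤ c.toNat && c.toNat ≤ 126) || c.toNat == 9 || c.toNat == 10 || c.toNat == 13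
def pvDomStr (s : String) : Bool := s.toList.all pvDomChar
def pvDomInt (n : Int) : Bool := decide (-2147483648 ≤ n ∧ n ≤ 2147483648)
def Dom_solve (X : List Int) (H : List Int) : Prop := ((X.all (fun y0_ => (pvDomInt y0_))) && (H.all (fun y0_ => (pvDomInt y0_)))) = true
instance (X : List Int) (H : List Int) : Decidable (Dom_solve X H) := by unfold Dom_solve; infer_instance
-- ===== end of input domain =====

-- B replaces A's monotonic stack by a stack-free inner forward scan over the already-computed
-- answers; same return value, simpler code (objective: simpler, no speed claim).

-- ===== PORT A =====
-- the 'while st and st[-1][0] <= dist: …pop…' loop (stack head = Python st[-1])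
def popLoop (st : List (Int × Int)) (dist : Int) : List (Int × Int) × Int :=
  match st with
  | [] => ([], dist)
  | (x, d) :: rest => if x ≤ dist then popLoop rest (max dist d) else ((x, d) :: rest, dist)

-- the 'for i in range(n-1, -1, -1)' loop; counter k+1 means current index i = k
def goA (X H : List Int) : Nat → List (Int × Int) × List Int → List (Int × Int) × List Int
  | 0, s => s
  | Nat.succ k, (st, ans) =>
      let dist := X.getD k 0 + H.getD k 0
      let p := popLoop st dist
      goA X H k ((X.getD k 0, p.2) :: p.1, ans.set k p.2)

def solve (X : List Int) (H : List Int) : List Int :=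
  (goA X H X.length ([], List.replicate X.length 0)).2

-- ===== PORT B =====
-- the 'for j in range(i+1, n): if X[j] <= dist: dist = max(dist, ans[j]) else: break' loop
def scanLoop (X ans : List Int) (n j : Nat) (dist : Int) : Int :=
  if h : j < n then
    if X.getD j 0 ≤ dist then scanLoop X ans n (j + 1) (max dist (ans.getD j 0)) else dist
  else dist
termination_by n - j

def goB (X H : List Int) : Nat → List Int → List Int
  | 0, ans => ans
  | Nat.succ k, ans =>
      let dist := X.getD k 0 + H.getD k 0
      goB X H k (ans.set k (scanLoop X ans X.length (k + 1) dist))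

def solve_alt (X : List Int) (H : List Int) : List Int :=
  goB X H X.length (List.replicate X.length 0)

-- ===== PRECONDITION & SPEC =====
-- Pre_ excludes only the inputs where both Pythons raise IndexError: H shorter than X.
def Pre_solve (X : List Int) (H : List Int) : Prop := X.length ≤ H.length
instance (X : List Int) (H : List Int) : Decidable (Pre_solve X H) := by unfold Pre_solve; infer_instance
def pvWitness_solve : List Int × List Int := ([1, 5, 2], [1, 1, 1])

def Spec_solve (X : List Int) (H : List Int) (out : List Int) : Prop := out = solve_alt X H
instance (X : List Int) (H : List Int) (out : List Int) : Decidable (Spec_solve X H out) := by unfold Spec_solve; infer_instance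

-- ===== CLAIM (what is proved, stated in full; the proofs are below) =====
def Claim_equal_solve : Prop := ∀ (X : List Int) (H : List Int), Dom_solve X H → Pre_solve X H → Spec_solve X H (solve X H)

-- ===== LEMMAS AND PROOFS =====

-- invariant: the stack (top first) is the chain of indices k = j1 < j2 < …, each element being
-- (X[j], ans[j]); between consecutive chain indices all X and ans values are bounded by the lower
-- chain index's ans, and each next chain index has X strictly above the previous ans.
inductive StkInv (X ans : List Int) (n : Nat) : Nat → List (Int × Int) → Prop
  | nil : StkInv X ans n n []
  | cons {k k' : Nat} {st : List (Int × Int)} :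
      k < n → k < k' →
      StkInv X ans n k' st →
      (∀ j, k < j → j < k' → X.getD j 0 ≤ ans.getD k 0 ∧ ans.getD j 0 ≤ ans.getD k 0) →
      (k' = n ∨ ans.getD k 0 < X.getD k' 0) →
      StkInv X ans n k ((X.getD k 0, ans.getD k 0) :: st)

lemma getD_set_ne (l : List Int) (i j : Nat) (v d : Int) (h : i ≠ j) :
    (l.set i v).getD j d = l.getD j d := by
  simp [List.getD, List.getElem?_set_ne h]

lemma getD_set_self (l : List Int) (i : Nat) (v d : Int) (h : i < l.length) :
    (l.set i v).getD i d = v := by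
  simp [List.getD, h]

lemma Inv_set {X ans : List Int} {n k : Nat} {st : List (Int × Int)} {i : Nat} {v : Int}
    (hik : i < k) (h : StkInv X ans n k st) : StkInv X (ans.set i v) n k st := by
  induction h with
  | nil => exact StkInv.nil
  | cons hk hkk' hst hgap hbd ih =>
    rename_i k k' st
    have hk0 : (ans.set i v).getD k 0 = ans.getD k 0 := getD_set_ne _ _ _ _ _ (by omega)
    rw [← hk0]
    exact StkInv.cons hk hkk' (ih (by omega))
      (fun j hj1 hj2 => by
        rw [hk0, getD_set_ne _ _ _ _ _ (by omega : i ≠ j)]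
        exact hgap j hj1 hj2)
      (by rw [hk0]; exact hbd)

lemma scan_ge (X ans : List Int) (n j : Nat) (dist : Int) (h : n ≤ j) :
    scanLoop X ans n j dist = dist := by
  rw [scanLoop]
  simp [Nat.not_lt.mpr h]

lemma scan_skip (X ans : List Int) (n : Nat) (dist : Int) :
    ∀ (d a b : Nat), b = a + d →
      (∀ j, a ≤ j → j < b → X.getD j 0 ≤ dist ∧ ans.getD j 0 ≤ dist) →
      scanLoop X ans n a dist = scanLoop X ans n b dist := by
  intro d
  induction d with
  | zero => intro a b hb _; subst hb; rfl
  | succ d ih =>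
    intro a b hb hgap
    by_cases han : a < n
    · have hXa := (hgap a le_rfl (by omega)).1
      have hansa := (hgap a le_rfl (by omega)).2
      rw [scanLoop]
      rw [dif_pos han, if_pos hXa, max_eq_left hansa]
      exact ih (a + 1) b (by omega) (fun j hj1 hj2 => hgap j (by omega) hj2)
    · rw [scan_ge _ _ _ _ _ (by omega), scan_ge _ _ _ _ _ (by omega)]

lemma pop_eq_scan {X ans : List Int} {n : Nat} :
    ∀ {k st}, StkInv X ans n k st → ∀ dist : Int,
      (popLoop st dist).2 = scanLoop X ans n k dist := by
  intro k st h
  induction h with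
  | nil => intro dist; rw [scan_ge _ _ _ _ _ le_rfl]; rfl
  | cons hk hkk' hst hgap hbd ih =>
    rename_i k k' st
    intro dist
    by_cases hle : X.getD k 0 ≤ dist
    · rw [scanLoop, dif_pos hk, if_pos hle]
      simp only [popLoop, if_pos hle]
      rw [ih (max dist (ans.getD k 0))]
      exact (scan_skip X ans n (max dist (ans.getD k 0)) (k' - (k + 1)) (k + 1) k' (by omega)
        (fun j hj1 hj2 => ⟨le_trans (hgap j (by omega) hj2).1 (le_max_right _ _),
                           le_trans (hgap j (by omega) hj2).2 (le_max_right _ _)⟩)).symm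
    · rw [scanLoop, dif_pos hk, if_neg hle]
      simp only [popLoop, if_neg hle]

lemma pop_ok {X ans : List Int} {n : Nat} :
    ∀ {k st}, StkInv X ans n k st → ∀ dist : Int,
      dist ≤ (popLoop st dist).2 ∧
      ∃ k'', k ≤ k'' ∧ StkInv X ans n k'' (popLoop st dist).1 ∧
        (∀ j, k ≤ j → j < k'' → X.getD j 0 ≤ (popLoop st dist).2 ∧ ans.getD j 0 ≤ (popLoop st dist).2) ∧
        (k'' = n ∨ (popLoop st dist).2 < X.getD k'' 0) := by
  intro k st h
  induction h with
  | nil =>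
    intro dist
    exact ⟨le_rfl, n, le_rfl, StkInv.nil, fun j hj1 hj2 => absurd (lt_of_le_of_lt hj1 hj2) (lt_irrefl n), Or.inl rfl⟩
  | cons hk hkk' hst hgap hbd ih =>
    rename_i k k' st
    intro dist
    by_cases hle : X.getD k 0 ≤ dist
    · simp only [popLoop, if_pos hle]
      obtain ⟨hd, k'', hk'', hinv', hgap', hbd'⟩ := ih (max dist (ans.getD k 0))
      refine ⟨le_trans (le_max_left _ _) hd, k'', by omega, hinv', ?_, hbd'⟩
      intro j hj1 hj2
      rcases Nat.lt_or_ge j k' with hjk' | hjk'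
      · rcases Nat.eq_or_lt_of_le hj1 with rfl | hklt
        · exact ⟨le_trans hle (le_trans (le_max_left _ _) hd),
                 le_trans (le_max_right _ _) hd⟩
        · have := hgap j hklt hjk'
          exact ⟨le_trans this.1 (le_trans (le_max_right _ _) hd),
                 le_trans this.2 (le_trans (le_max_right _ _) hd)⟩
      · exact hgap' j hjk' hj2
    · simp only [popLoop, if_neg hle]
      refine ⟨le_rfl, k, le_rfl, StkInv.cons hk hkk' hst hgap hbd,
        fun j hj1 hj2 => absurd (lt_of_le_of_lt hj1 hj2) (lt_irrefl k), Or.inr (by omega)⟩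

lemma step_inv {X ans : List Int} {n k : Nat} {st : List (Int × Int)} (dist0 : Int)
    (hinv : StkInv X ans n (k + 1) st) (hk : k < n) (hka : k < ans.length) :
    StkInv X (ans.set k (popLoop st dist0).2) n k
      ((X.getD k 0, (popLoop st dist0).2) :: (popLoop st dist0).1) := by
  obtain ⟨hd, k'', hk'', hinv', hgap, hbd⟩ := pop_ok hinv dist0
  have he : (ans.set k (popLoop st dist0).2).getD k 0 = (popLoop st dist0).2 :=
    getD_set_self _ _ _ _ hka
  have hel : (X.getD k 0, (popLoop st dist0).2)
      = (X.getD k 0, (ans.set k (popLoop st dist0).2).getD k 0) := by rw [he]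
  rw [hel]
  refine StkInv.cons hk (by omega) (Inv_set (by omega) hinv') ?_ ?_
  · intro j hj1 hj2
    rw [he, getD_set_ne _ _ _ _ _ (by omega : k ≠ j)]
    exact hgap j (by omega) hj2
  · rw [he]; exact hbd

lemma Inv_cases_le {X ans : List Int} {n k : Nat} {st : List (Int × Int)}
    (h : StkInv X ans n (k + 1) st) : k < n := by
  cases h with
  | nil => omega
  | cons hk _ _ _ _ => omega

lemma go_eq (X H : List Int) :
    ∀ (k : Nat) (st : List (Int × Int)) (ans : List Int),
      ans.length = X.length →
      StkInv X ans X.length k st →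
      (goA X H k (st, ans)).2 = goB X H k ans := by
  intro k
  induction k with
  | zero => intro st ans _ _; rfl
  | succ k ih =>
    intro st ans hlen hinv
    have hkn : k < X.length := Inv_cases_le hinv
    have hA : (popLoop st (X.getD k 0 + H.getD k 0)).2
        = scanLoop X ans X.length (k + 1) (X.getD k 0 + H.getD k 0) :=
      pop_eq_scan hinv _
    simp only [goA, goB]
    rw [← hA]
    exact ih _ _ (by rw [List.length_set]; exact hlen)
      (step_inv _ hinv hkn (by omega))

-- ===== VERDICT (by name: the statement is the Claim_ definition above) =====
theorem solve_spec : Claim_equal_solve := by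
  intro X H _ _
  unfold Spec_solve solve solve_alt
  exact go_eq X H X.length [] (List.replicate X.length 0) (by simp) StkInv.nil
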